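-- pv_equiv track=rewrite | github.com/ValiDraganescu/vault | security_manager.py | __adjust_to_length
-- ===== SOURCE A (Python) =====
-- from typing import Tuple, Optional
--
-- def __adjust_to_length(data: str, length: int, padding_data: Optional[str] = None) -> str:
--     i = 0
--     while len(data) < length:
--         padding = padding_data if padding_data else data[i]
--         data += padding
--         i += 1
--         if i == len(data):
--             i = 0
--     return data
-- ===== SOURCE B (Python) =====
-- def __adjust_to_length(data, length, padding_data=None):
--     deficit = length - len(data)
--     if deficit <= 0:
--         return data
--     if padding_data:
--         # repeat the pad block just enough times (ceil), reproducing A's overshoot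
--         return data + padding_data * (-(-deficit // len(padding_data)))
--     # cyclic self-padding: repeat data and cut at exactly `length`
--     reps = -(-length // len(data))
--     return (data * reps)[:length]
-- ===== Notes on version B (the rewrite author's own statement) =====
-- stated objective: simpler
-- what changed: Replaces A's char-by-char growing while-loop (with its running index into the growing string) by closed forms: for truthy padding_data, data plus ceil(deficit/len(pad)) copies of the pad block; otherwise (data * ceil(length/len(data)))[:length], the repeated string cut to length.
-- outside the precondition, e.g. on __adjust_to_length('', 3, None): A raises IndexError, B raises ZeroDivisionError; on __adjust_to_length('', 2, ''): A raises IndexError, B raises ZeroDivisionError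
import Mathlib
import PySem

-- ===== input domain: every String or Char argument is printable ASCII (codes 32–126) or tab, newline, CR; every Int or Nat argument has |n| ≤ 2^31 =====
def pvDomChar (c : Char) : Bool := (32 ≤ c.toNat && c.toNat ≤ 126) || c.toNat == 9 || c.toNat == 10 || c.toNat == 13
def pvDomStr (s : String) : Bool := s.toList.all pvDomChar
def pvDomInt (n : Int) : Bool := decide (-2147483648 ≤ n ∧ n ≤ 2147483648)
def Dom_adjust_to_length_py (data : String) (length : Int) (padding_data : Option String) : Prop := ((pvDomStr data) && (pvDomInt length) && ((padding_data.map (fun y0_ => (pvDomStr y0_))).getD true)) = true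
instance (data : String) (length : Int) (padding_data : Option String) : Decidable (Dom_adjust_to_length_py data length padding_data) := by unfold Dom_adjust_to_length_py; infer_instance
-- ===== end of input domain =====

-- B replaces A's char-by-char growing while-loop by closed forms: ceiling-many pad blocks, or
-- the repeated string cut to length (objective: simpler).

-- ===== PORT A =====
-- A's while-loop: `while len(data) < length: padding = padding_data if padding_data else data[i]; …`.
-- Structural recursion on fuel; each iteration grows data by ≥ 1 char, so fuel = initial deficit
-- suffices and the fuel-0 case is never reached on admitted inputs (totalizing device only).
-- `padding = []` happens exactly where Python's data[i] raises IndexError (empty data, falsy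
-- padding_data); that branch too only totalizes the recursion and is excluded by Pre_.
def pvAdjustLoop (length : Int) (padding_data : Option (List Char)) :
    Nat → List Char → Int → List Char
  | 0, data, _ => data
  | fuel + 1, data, i =>
    if (data.length : Int) < length then
      let padding : List Char :=
        match padding_data with
        | some p => if p ≠ [] then p else ((PySem.List.pyGet? data i).map (fun c => [c])).getD []
        | none => ((PySem.List.pyGet? data i).map (fun c => [c])).getD []
      if padding = [] then data
      else
        let data' := data ++ padding
        let i' := i + 1
        pvAdjustLoop length padding_data fuel data' (if i' = (data'.length : Int) then 0 else i')
    else data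

def adjust_to_length_py (data : String) (length : Int) (padding_data : Option String) : String :=
  String.ofList (pvAdjustLoop length (padding_data.map String.toList)
    (length - data.toList.length).toNat data.toList 0)

-- ===== PORT B =====
-- (data * reps)[:length]  with reps = -(-length // len(data))   (the falsy-padding branch of Source B)
def pvCyclicFill (d : List Char) (length : Int) : String :=
  String.ofList (PySem.List.slice
    (PySem.List.pyRepeat d (-(PySem.Int.floordiv (-length) (d.length : Int)))) none (some length))

def adjust_to_length_py_alt (data : String) (length : Int) (padding_data : Option String) : String :=
  let d := data.toList
  let deficit := length - (d.length : Int)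
  if deficit ≤ 0 then data
  else
    match padding_data with
    | some p =>
      if p.toList ≠ [] then
        String.ofList (d ++ PySem.List.pyRepeat p.toList
          (-(PySem.Int.floordiv (-deficit) (p.toList.length : Int))))
      else pvCyclicFill d length
    | none => pvCyclicFill d length

-- ===== PRECONDITION & SPEC =====
-- Pre_ excludes exactly the inputs where A raises IndexError: empty data with falsy padding_data
-- and a positive target length (Python B raises there too, a ZeroDivisionError).
def Pre_adjust_to_length_py (data : String) (length : Int) (padding_data : Option String) : Prop :=
  ¬ (data = "" ∧ (padding_data = none ∨ padding_data = some "") ∧ 1 ≤ length)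
instance (data : String) (length : Int) (padding_data : Option String) : Decidable (Pre_adjust_to_length_py data length padding_data) := by unfold Pre_adjust_to_length_py; infer_instance

def pvWitness_adjust_to_length_py : String × Int × Option String := ("ab", 7, none)

def Spec_adjust_to_length_py (data : String) (length : Int) (padding_data : Option String) (out : String) : Prop := out = adjust_to_length_py_alt data length padding_data
instance (data : String) (length : Int) (padding_data : Option String) (out : String) : Decidable (Spec_adjust_to_length_py data length padding_data out) := by unfold Spec_adjust_to_length_py; infer_instance

-- ===== CLAIM (what is proved, stated in full; the proofs are below) =====
def Claim_equal_adjust_to_length_py : Prop := ∀ (data : String) (length : Int) (padding_data : Option String), Dom_adjust_to_length_py data length padding_data → Pre_adjust_to_length_py data length padding_data → Spec_adjust_to_length_py data length padding_data (adjust_to_length_py data length padding_data)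

-- ===== LEMMAS AND PROOFS =====

-- ceiling division -(-d // m), as both branches of Source B compute it
def pvCeil (d m : Int) : Int := -(PySem.Int.floordiv (-d) m)

theorem pvCeil_bounds (d : Int) {m : Int} (hm : 0 < m) :
    (pvCeil d m - 1) * m < d ∧ d ≤ pvCeil d m * m :=
  (PySem.Int.neg_floordiv_neg_eq_iff_of_pos hm).mp rfl

theorem pvCeil_eq_one {d m : Int} (hm : 0 < m) (h0 : 0 < d) (h1 : d ≤ m) : pvCeil d m = 1 := by
  rw [pvCeil, PySem.Int.neg_floordiv_neg_eq_iff_of_pos hm]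
  constructor <;> nlinarith

theorem pvCeil_pos {d m : Int} (hm : 0 < m) (h0 : 0 < d) : 0 < pvCeil d m := by
  obtain ⟨h1, h2⟩ := pvCeil_bounds d hm
  nlinarith

theorem pvCeil_succ {d m : Int} (hm : 0 < m) (_hmd : m < d) :
    pvCeil d m = pvCeil (d - m) m + 1 := by
  obtain ⟨h1, h2⟩ := pvCeil_bounds (d - m) hm
  rw [pvCeil, PySem.Int.neg_floordiv_neg_eq_iff_of_pos hm]
  constructor <;> nlinarith

theorem pyRepeat_succ {α : Type} (xs : List α) {k : Int} (hk : 0 ≤ k) :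
    PySem.List.pyRepeat xs (k + 1) = xs ++ PySem.List.pyRepeat xs k := by
  simp only [PySem.List.pyRepeat]
  have : (k + 1).toNat = k.toNat + 1 := by omega
  rw [this, List.replicate_succ, List.flatten_cons]

-- A's loop returns data unchanged once the target length is reached
theorem pvAdjustLoop_exit (length : Int) (pd : Option (List Char)) (fuel : Nat)
    (data : List Char) (i : Int) (h : ¬ ((data.length : Int) < length)) :
    pvAdjustLoop length pd fuel data i = data := by
  cases fuel with
  | zero => rfl
  | succ fuel => rw [pvAdjustLoop.eq_def]; simp [h]

-- one iteration of A's loop with truthy padding_data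
theorem pvAdjustLoop_step_pad (length : Int) (p : List Char) (fuel : Nat) (data : List Char)
    (i : Int) (hcond : (data.length : Int) < length) (hp : p ≠ []) :
    pvAdjustLoop length (some p) (fuel + 1) data i =
      pvAdjustLoop length (some p) fuel (data ++ p)
        (if i + 1 = ((data ++ p).length : Int) then 0 else i + 1) := by
  rw [pvAdjustLoop.eq_def]
  simp [hcond, hp]

-- one iteration of A's loop with falsy padding_data and data[i] in range
theorem pvAdjustLoop_step_cyc (length : Int) (pd : Option (List Char)) (fuel : Nat)
    (data : List Char) (i : Int) (c : Char) (h : (data.length : Int) < length)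
    (hpd : pd = none ∨ pd = some []) (hget : PySem.List.pyGet? data i = some c) :
    pvAdjustLoop length pd (fuel + 1) data i =
      pvAdjustLoop length pd fuel (data ++ [c])
        (if i + 1 = ((data ++ [c]).length : Int) then 0 else i + 1) := by
  rw [pvAdjustLoop.eq_def]
  rcases hpd with hpd | hpd <;> subst hpd <;> simp [h, hget]

-- the truthy-padding loop appends exactly ceil(deficit / |p|) copies of p
theorem pvAdjustLoop_pad (length : Int) (p : List Char) (hp : p ≠ []) :
    ∀ fuel : Nat, ∀ cur : List Char, ∀ i : Int, (cur.length : Int) < length →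
      (length - cur.length) ≤ fuel →
      pvAdjustLoop length (some p) fuel cur i =
        cur ++ PySem.List.pyRepeat p (pvCeil (length - cur.length) (p.length : Int)) := by
  intro fuel
  induction fuel with
  | zero => intro cur i hlt hfuel; simp at hfuel; omega
  | succ fuel ih =>
    intro cur i hlt hfuel
    have hm : (0 : Int) < (p.length : Int) := by
      have := List.length_pos_iff.mpr hp; omega
    have hd0 : (0 : Int) < length - cur.length := by omega
    rw [pvAdjustLoop_step_pad length p fuel cur i hlt hp]
    by_cases hrec : ((cur ++ p).length : Int) < length
    · -- recursive case
      rw [ih (cur ++ p) (if i + 1 = ((cur ++ p).length : Int) then 0 else i + 1) hrec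
        (by simp only [List.length_append] at hrec ⊢; push_cast at hrec ⊢; omega)]
      have hlen : ((cur ++ p).length : Int) = cur.length + p.length := by
        simp [List.length_append]
      rw [List.append_assoc]
      congr 1
      have hmlt : (p.length : Int) < length - cur.length := by omega
      have hc' : (0 : Int) ≤ pvCeil (length - (cur ++ p).length) (p.length : Int) := by
        refine le_of_lt (pvCeil_pos hm ?_)
        rw [hlen]; omega
      rw [← pyRepeat_succ p hc']
      congr 1
      rw [pvCeil_succ hm hmlt]
      congr 2
      rw [hlen]; ring
    · -- terminal case: one append reaches the target
      rw [pvAdjustLoop_exit length (some p) fuel _ _ hrec]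
      congr 1
      have hle : length - (cur.length : Int) ≤ p.length := by
        simp only [List.length_append] at hrec; push_cast at hrec; omega
      rw [pvCeil_eq_one hm hd0 hle]
      simp [PySem.List.pyRepeat]

-- the cyclic extension of d to k characters: position j holds d[j % |d|]
def pvExt (d : List Char) (k : ℕ) : List Char :=
  (List.range k).map (fun j => d.getD (j % d.length) ' ')

theorem pvExt_length (d : List Char) (k : ℕ) : (pvExt d k).length = k := by
  simp [pvExt]

theorem pvExt_self (d : List Char) : pvExt d d.length = d := by
  apply List.ext_getElem
  · simp [pvExt]
  · intro j h1 h2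
    simp only [pvExt, List.getElem_map, List.getElem_range]
    simp only [pvExt, List.length_map, List.length_range] at h1
    rw [Nat.mod_eq_of_lt h2, List.getD_eq_getElem d ' ' h2]

-- the falsy-padding loop computes the cyclic extension to the target length
theorem pvAdjustLoop_cyc (length : Int) (pd : Option (List Char))
    (hpd : pd = none ∨ pd = some []) (d : List Char) (hd : d ≠ []) :
    ∀ fuel : Nat, ∀ m : ℕ, (length - (d.length + m : ℕ) : Int).toNat ≤ fuel →
      pvAdjustLoop length pd fuel (pvExt d (d.length + m)) (m : Int) =
        pvExt d (max (d.length + m) length.toNat) := by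
  have hn : 0 < d.length := List.length_pos_iff.mpr hd
  intro fuel
  induction fuel with
  | zero =>
    intro m hfuel
    have hle : ¬ (((pvExt d (d.length + m)).length : Int) < length) := by
      rw [pvExt_length]; push_cast at hfuel ⊢; omega
    rw [pvAdjustLoop_exit length pd 0 _ _ hle]
    congr 1
    push_cast at hfuel
    omega
  | succ fuel ih =>
    intro m hfuel
    by_cases hlt : ((d.length + m : ℕ) : Int) < length
    · -- loop body runs once more
      have hlen : ((pvExt d (d.length + m)).length : Int) < length := by
        rw [pvExt_length]; exact_mod_cast hlt
      have hget : PySem.List.pyGet? (pvExt d (d.length + m)) (m : Int) =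
          some (d.getD (m % d.length) ' ') := by
        rw [PySem.List.pyGet?_natCast]
        simp only [pvExt, List.getElem?_map]
        rw [List.getElem?_range (by omega)]
        rfl
      rw [pvAdjustLoop_step_cyc length pd fuel (pvExt d (d.length + m)) (m : Int)
        (d.getD (m % d.length) ' ') hlen hpd hget]
      have hdata : pvExt d (d.length + m) ++ [d.getD (m % d.length) ' '] =
          pvExt d (d.length + (m + 1)) := by
        simp only [pvExt]
        have h1 : d.length + (m + 1) = (d.length + m) + 1 := by omega
        rw [h1, List.range_succ, List.map_append, List.map_singleton, Nat.add_mod_left]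
      rw [hdata]
      have hno : ¬ ((m : Int) + 1 = ((pvExt d (d.length + (m + 1))).length : Int)) := by
        rw [pvExt_length]; push_cast; omega
      rw [if_neg hno]
      have hc : ((m : Int) + 1) = ((m + 1 : ℕ) : Int) := by push_cast; ring
      rw [hc, ih (m + 1) (by push_cast at hlt hfuel ⊢; omega)]
      congr 1
      push_cast at hlt
      omega
    · -- loop exits
      rw [pvAdjustLoop_exit length pd _ _ _ (by rw [pvExt_length]; exact_mod_cast hlt)]
      congr 1
      push_cast at hlt
      omega

-- |d| copies of d laid end to end are the cyclic extension to k·|d|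
theorem pvRep_ext (d : List Char) :
    ∀ k : ℕ, (List.replicate k d).flatten = pvExt d (k * d.length) := by
  intro k
  induction k with
  | zero => simp [pvExt]
  | succ k ih =>
    rw [List.replicate_succ, List.flatten_cons, ih]
    have h2 : pvExt d ((k + 1) * d.length) = d ++ pvExt d (k * d.length) := by
      have h1 : (k + 1) * d.length = d.length + k * d.length := by ring
      rw [pvExt, h1, List.range_add, List.map_append]
      congr 1
      · exact pvExt_self d
      · rw [pvExt, List.map_map]
        apply List.map_congr_left
        intro j _
        simp
    rw [h2]

theorem pvExt_take (d : List Char) {L M : ℕ} (h : L ≤ M) :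
    (pvExt d M).take L = pvExt d L := by
  rw [pvExt, pvExt, ← List.map_take, List.take_range]
  congr 2
  omega

theorem toList_eq_nil_iff' (s : String) : s.toList = [] ↔ s = "" := by
  constructor
  · intro h
    have := congrArg String.ofList h
    rwa [String.ofList_toList] at this
  · intro h; subst h; rfl

-- B's cyclic closed form equals the cyclic extension, when padding is really needed
theorem pvCyclicFill_eq (d : List Char) (length : Int) (hd : d ≠ [])
    (hlt : (d.length : Int) < length) :
    pvCyclicFill d length = String.ofList (pvExt d length.toNat) := by
  have hn : 0 < d.length := List.length_pos_iff.mpr hd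
  have hm : (0 : Int) < (d.length : Int) := by exact_mod_cast hn
  have hlenpos : (0 : Int) < length := by omega
  unfold pvCyclicFill
  rw [PySem.List.slice_to
    (PySem.List.pyRepeat d (-(PySem.Int.floordiv (-length) (d.length : Int))))
    (le_of_lt hlenpos)]
  congr 1
  have hb := pvCeil_bounds length hm
  have hpos : 0 < pvCeil length (d.length : Int) := pvCeil_pos hm hlenpos
  have hcast : pvCeil length (d.length : Int) =
      (((pvCeil length (d.length : Int)).toNat : ℕ) : Int) := by omega
  have hLle : length.toNat ≤ (pvCeil length (d.length : Int)).toNat * d.length := by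
    have h2 : length ≤ (((pvCeil length (d.length : Int)).toNat * d.length : ℕ) : Int) := by
      push_cast
      rw [← hcast]
      exact hb.2
    omega
  show ((List.replicate (pvCeil length (d.length : Int)).toNat d).flatten).take length.toNat
      = pvExt d length.toNat
  rw [pvRep_ext d ((pvCeil length (d.length : Int)).toNat), pvExt_take d hLle]

-- ===== VERDICT (by name: the statement is the Claim_ definition above) =====
theorem adjust_to_length_py_spec : Claim_equal_adjust_to_length_py := by
  intro data length padding_data _hdom hpre
  unfold Spec_adjust_to_length_py adjust_to_length_py adjust_to_length_py_alt
  set d := data.toList with hdd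
  by_cases hlen : length - (d.length : Int) ≤ 0
  · -- already long enough: both return data unchanged
    rw [if_pos hlen, pvAdjustLoop_exit length _ _ _ _ (by omega)]
    exact String.ofList_toList
  · rw [if_neg hlen]
    have hlt : (d.length : Int) < length := by omega
    have hfuel : length - (d.length : Int) ≤ ((length - (d.length : Int)).toNat : Int) := by
      omega
    cases hpd : padding_data with
    | some p =>
      dsimp only
      by_cases hp : p.toList = []
      · -- falsy padding "" → cyclic branch
        rw [if_neg (by simpa using hp)]
        have hpe : p = "" := (toList_eq_nil_iff' p).mp hp
        have hd : d ≠ [] := by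
          intro h
          exact hpre ⟨(toList_eq_nil_iff' data).mp h, Or.inr (by rw [hpd, hpe]),
            by rw [h] at hlt; simp at hlt; omega⟩
        have h0 := pvAdjustLoop_cyc length ((some p).map String.toList)
          (Or.inr (by simp [hp])) d hd (length - (d.length : Int)).toNat 0
          (by push_cast; omega)
        simp only [Nat.add_zero, Nat.cast_zero] at h0
        rw [pvExt_self d] at h0
        simp only [Option.map_some] at h0 ⊢
        rw [h0, pvCyclicFill_eq d length hd hlt]
        congr 2
        omega
      · rw [if_pos (by simpa using hp)]
        have hstep := pvAdjustLoop_pad length p.toList hp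
          (length - (d.length : Int)).toNat d 0 hlt hfuel
        simp only [Option.map_some] at hstep ⊢
        rw [hstep]
        rfl
    | none =>
      dsimp only
      have hd : d ≠ [] := by
        intro h
        exact hpre ⟨(toList_eq_nil_iff' data).mp h, Or.inl hpd,
          by rw [h] at hlt; simp at hlt; omega⟩
      have h0 := pvAdjustLoop_cyc length (Option.map String.toList none) (Or.inl rfl) d hd
        (length - (d.length : Int)).toNat 0 (by push_cast; omega)
      simp only [Nat.add_zero, Nat.cast_zero] at h0
      rw [pvExt_self d] at h0
      simp only [Option.map_none] at h0 ⊢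
      rw [h0, pvCyclicFill_eq d length hd hlt]
      congr 2
      omega
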